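-- pv_equiv track=rewrite | github.com/PedroPDIN/Codewars_Kata_Resolution | Python/binary_pyramid.py | binary_pyramid
-- ===== SOURCE A (Python) =====
-- def binary_pyramid(m, n):
--     list_binaries = []
--     total_sum = 0
--     for v in range(m, n + 1, 1):
--         current_binary = bin(v).split("b")[1]
--         list_binaries.append(int(current_binary))
--
--     total_sum = sum(list_binaries)
--     return bin(total_sum).split("b")[1]
-- ===== SOURCE B (Python) =====
-- def count_below(x, i):
--     """How many k in [0, x) have bit i set."""
--     period = 1 << (i + 1)
--     full, rem = divmod(x, period)
--     return full * (period >> 1) + max(0, rem - (period >> 1))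
--
--
-- def binary_pyramid(m, n):
--     # Each v in [m, n] contributes, read in decimal, 10**i for every set bit i,
--     # so total = sum over bits of 10**i * (number of v in [m, n] with bit i set).
--     if n < m:
--         return "0"
--     total = 0
--     for i in range((n + 1).bit_length()):
--         total += (count_below(n + 1, i) - count_below(m, i)) * 10 ** i
--     return format(total, "b")
-- ===== Notes on version B (the rewrite author's own statement) =====
-- stated objective: alternative
-- what changed: Instead of converting every value in [m, n] to a binary string and summing the parsed decimals, B adds 10**i times the closed-form count of values in the range with bit i set (O(log^2 n) arithmetic steps vs A's O((n-m) log n)); Pre_ excludes ranges containing a negative value, where 'binary representation read as decimal' is unspecified (A's bin(v).split('b')[1] reads the digits of |v|, B's two's-complement bit counts give another value) and neither value is specified by the task.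
-- outside the precondition, e.g. on binary_pyramid(-2, 2): A returns '10110', B returns '100000'
import Mathlib
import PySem

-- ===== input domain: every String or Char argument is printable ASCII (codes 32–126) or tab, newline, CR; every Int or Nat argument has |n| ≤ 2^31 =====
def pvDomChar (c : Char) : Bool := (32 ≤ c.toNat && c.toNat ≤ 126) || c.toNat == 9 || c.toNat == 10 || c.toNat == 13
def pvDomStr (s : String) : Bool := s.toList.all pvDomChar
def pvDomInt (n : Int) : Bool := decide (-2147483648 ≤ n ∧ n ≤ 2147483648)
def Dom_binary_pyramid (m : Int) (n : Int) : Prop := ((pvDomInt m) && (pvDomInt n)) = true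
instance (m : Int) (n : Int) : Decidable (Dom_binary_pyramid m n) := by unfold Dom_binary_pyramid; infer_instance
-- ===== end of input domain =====

-- B replaces A's per-value binary-string building and decimal re-parsing by a per-bit
-- closed-form count of range elements with bit i set (objective: alternative algorithm).

-- ===== PORT A =====
def binary_pyramid (m : Int) (n : Int) : String :=
  let list_binaries : List Int := (PySem.List.pyRange m (n + 1) 1).foldl
    (fun acc v =>
      let current_binary : String :=
        PySem.List.pyGetD ((PySem.Str.split? (PySem.Int.pyBin v) "b").getD []) 1 ""
      -- int() cannot raise here (current_binary is a nonempty digit string), so .getD 0 is never used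
      acc ++ [(PySem.Int.ofStr? current_binary).getD 0]) []
  let total_sum : Int := list_binaries.sum
  PySem.List.pyGetD ((PySem.Str.split? (PySem.Int.pyBin total_sum) "b").getD []) 1 ""

-- ===== PORT B =====
def count_below (x : Int) (i : Nat) : Int :=
  let period : Int := 1 <<< (i + 1)
  let half : Int := period >>> (1 : Nat)
  let full : Int := PySem.Int.floordiv x period
  let rem : Int := PySem.Int.mod x period
  full * half + max 0 (rem - half)

def binary_pyramid_alt (m : Int) (n : Int) : String :=
  if n < m then "0"
  else
    let total : Int := (PySem.List.pyRange 0 ((PySem.Int.bitLength (n + 1) : Nat) : Int) 1).foldl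
      (fun total i =>
        total + (count_below (n + 1) i.toNat - count_below m i.toNat) * 10 ^ i.toNat) 0
    PySem.Int.toBin total

-- ===== PRECONDITION & SPEC =====
-- Pre_ excludes ranges containing a negative value (m < 0 ∧ m ≤ n): there "binary
-- representation read as a decimal number" is unspecified — A's bin(v).split("b")[1]
-- reads the digits of |v| while B's two's-complement bit counts give another value,
-- and neither value is specified by the task.
def Pre_binary_pyramid (m : Int) (n : Int) : Prop := ¬ (m < 0 ∧ m ≤ n)
instance (m : Int) (n : Int) : Decidable (Pre_binary_pyramid m n) := by unfold Pre_binary_pyramid; infer_instance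

def pvWitness_binary_pyramid : Int × Int := (0, 5)

def Spec_binary_pyramid (m : Int) (n : Int) (out : String) : Prop := out = binary_pyramid_alt m n
instance (m : Int) (n : Int) (out : String) : Decidable (Spec_binary_pyramid m n out) := by unfold Spec_binary_pyramid; infer_instance

-- ===== CLAIM (what is proved, stated in full; the proofs are below) =====
def Claim_equal_binary_pyramid : Prop := ∀ (m : Int) (n : Int), Dom_binary_pyramid m n → Pre_binary_pyramid m n → Spec_binary_pyramid m n (binary_pyramid m n)

-- ===== LEMMAS AND PROOFS =====

-- `decAcc a ds`: the value Python's int() assigns to the digit string ds, starting from accumulator a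
def decAcc (a : Nat) (ds : List Char) : Nat := ds.foldl (fun a c => a * 10 + (c.toNat - '0'.toNat)) a

-- `decv k`: the decimal number whose decimal digits are the binary digits of k
def decv (k : Nat) : Nat :=
  if k < 2 then k else 10 * decv (k / 2) + k % 2
decreasing_by exact Nat.div_lt_self (by omega) (by omega)

-- bit i of k
def bitv (i k : Nat) : Nat := k >>> i % 2

-- number of naturals in [0, x) with bit i set (Nat version of count_below)
def cntN (x i : Nat) : Nat := x / 2 ^ (i + 1) * 2 ^ i + (x % 2 ^ (i + 1) - 2 ^ i)

-- ---- Nat.toDigits characterization ----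
theorem td_acc (b : Nat) : ∀ (f n : Nat) (acc : List Char),
    Nat.toDigitsCore b f n acc = Nat.toDigitsCore b f n [] ++ acc := by
  intro f
  induction f with
  | zero => intro n acc; simp [Nat.toDigitsCore]
  | succ f ih =>
    intro n acc
    simp only [Nat.toDigitsCore]
    by_cases h : n / b = 0
    · simp [h]
    · simp only [h, if_false]
      rw [ih (n / b) (Nat.digitChar (n % b) :: acc), ih (n / b) [Nat.digitChar (n % b)]]
      simp

theorem td_fuel (b : Nat) (hb : 2 ≤ b) : ∀ (n f₁ f₂ : Nat) (acc : List Char), n < f₁ → n < f₂ →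
    Nat.toDigitsCore b f₁ n acc = Nat.toDigitsCore b f₂ n acc := by
  intro n
  induction n using Nat.strong_induction_on with
  | _ n ih =>
    intro f₁ f₂ acc h1 h2
    cases f₁ with
    | zero => omega
    | succ g₁ =>
      cases f₂ with
      | zero => omega
      | succ g₂ =>
        simp only [Nat.toDigitsCore]
        by_cases h : n / b = 0
        · simp [h]
        · simp only [h, if_false]
          have hn : 0 < n := by
            rcases Nat.eq_zero_or_pos n with hz | hz
            · exact absurd (by simp [hz]) h
            · exact hz
          have hnb : n / b < n := Nat.div_lt_self hn (by omega)
          exact ih (n / b) hnb g₁ g₂ _ (by omega) (by omega)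

theorem td_step (b n : Nat) (hb : 2 ≤ b) :
    Nat.toDigits b n = if n < b then [Nat.digitChar n]
      else Nat.toDigits b (n / b) ++ [Nat.digitChar (n % b)] := by
  show Nat.toDigitsCore b (n + 1) n [] = _
  by_cases h : n < b
  · have h0 : n / b = 0 := Nat.div_eq_of_lt h
    simp [Nat.toDigitsCore, h0, h, Nat.mod_eq_of_lt h]
  · have h0 : n / b ≠ 0 := by
      intro hc
      exact h (by have := Nat.lt_of_div_eq_zero (by omega) hc; omega)
    simp only [Nat.toDigitsCore, h0, if_false, if_neg h]
    have hnb : n / b < n := Nat.div_lt_self (by omega) (by omega)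
    rw [td_fuel b hb (n / b) n (n / b + 1) _ (by omega) (by omega)]
    exact td_acc b (n / b + 1) (n / b) [Nat.digitChar (n % b)]

theorem td2_chars (k : Nat) : ∀ c ∈ Nat.toDigits 2 k, c = '0' ∨ c = '1' := by
  induction k using Nat.strong_induction_on with
  | _ k ih =>
    intro c hc
    rw [td_step 2 k (by omega)] at hc
    by_cases h : k < 2
    · rw [if_pos h] at hc
      simp at hc
      interval_cases k
      · left; simpa using hc
      · right; simpa using hc
    · rw [if_neg h] at hc
      rcases List.mem_append.mp hc with h1 | h1
      · exact ih (k / 2) (Nat.div_lt_self (by omega) (by omega)) c h1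
      · have : k % 2 = 0 ∨ k % 2 = 1 := by omega
        rcases this with h2 | h2 <;> simp [h2] at h1
        · left; exact h1
        · right; exact h1

theorem td_ne_nil (b n : Nat) (hb : 2 ≤ b) : Nat.toDigits b n ≠ [] := by
  rw [td_step b n hb]
  split <;> simp

-- ---- int() on a nonempty all-digit string ----
theorem isIntSpace_of_digit (c : Char) (h : c.isDigit = true) : PySem.Int.isIntSpace c = false := by
  simp only [PySem.Int.isIntSpace, Bool.or_eq_false_iff, decide_eq_false_iff_not]
  refine ⟨⟨⟨⟨⟨?_, ?_⟩, ?_⟩, ?_⟩, ?_⟩, ?_⟩ <;> (intro hc; subst hc; exact absurd h (by decide))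

theorem dropWhile_digits (p : Char → Bool) (l : List Char) (h : ∀ c ∈ l, p c = false) :
    List.dropWhile p l = l := by
  cases l with
  | nil => rfl
  | cons a l => simp [h a (List.mem_cons_self)]

-- the compiled matcher of PySem.Int.ofChars? on a list whose head is neither '-' nor '+'
theorem match1_cons {motive : List Char → Sort _} (d : Char) (rest : List Char)
    (h1 : (ds : List Char) → motive ('-' :: ds)) (h2 : (ds : List Char) → motive ('+' :: ds))
    (h3 : (ds : List Char) → motive ds) (hd1 : d ≠ '-') (hd2 : d ≠ '+') :
    PySem.Int.ofChars?.match_1 motive (d :: rest) h1 h2 h3 = h3 (d :: rest) := by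
  delta PySem.Int.ofChars?.match_1
  conv_lhs => whnf
  generalize instDecidableEqChar d '-' = I
  cases I with
  | isTrue h => exact absurd h hd1
  | isFalse h =>
    conv_lhs => whnf
    generalize instDecidableEqChar d '+' = J
    cases J with
    | isTrue h2' => exact absurd h2' hd2
    | isFalse h2' => rfl

theorem ofChars?_digits : ∀ ds : List Char, ds ≠ [] → (∀ c ∈ ds, c.isDigit = true) →
    PySem.Int.ofChars? ds = some (decAcc 0 ds : Int) := by
  intro ds hne hdig
  rw [PySem.Int.ofChars?.eq_1]
  have hsp : ∀ c ∈ ds, PySem.Int.isIntSpace c = false :=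
    fun c hc => isIntSpace_of_digit c (hdig c hc)
  have hstrip1 : List.dropWhile PySem.Int.isIntSpace ds = ds := dropWhile_digits _ _ hsp
  have hstrip2 : List.dropWhile PySem.Int.isIntSpace ds.reverse = ds.reverse :=
    dropWhile_digits _ _ (fun c hc => hsp c (List.mem_reverse.mp hc))
  rw [hstrip1, hstrip2, List.reverse_reverse]
  cases ds with
  | nil => exact absurd rfl hne
  | cons d rest =>
    have hd : d.isDigit = true := hdig d (by simp)
    have hd1 : d ≠ '-' := by intro he; rw [he] at hd; exact absurd hd (by decide)
    have hd2 : d ≠ '+' := by intro he; rw [he] at hd; exact absurd hd (by decide)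
    rw [match1_cons d rest _ _ _ hd1 hd2]
    rw [show (some ((decAcc 0 (d :: rest) : Nat) : Int) : Option Int)
        = Option.map (fun n => n) (do let a ← some (decAcc 0 (d :: rest)); pure ((a : Nat) : Int)) from rfl]
    congr 1
    congr 1
    have hrest : ∀ c ∈ rest, c.isDigit = true := fun c hc => hdig c (by simp [hc])
    clear hdig hne hsp hstrip1 hstrip2 hd1 hd2
    conv_lhs => whnf
    generalize instDecidableEqBool d.isDigit true = I
    cases I with
    | isFalse hf => exact absurd hd hf
    | isTrue ht =>
    conv_lhs => whnf
    rw [show decAcc 0 (d :: rest) = decAcc (0 * 10 + (d.toNat - '0'.toNat)) rest from rfl]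
    generalize 0 * 10 + (d.toNat - '0'.toNat) = A
    clear hd
    revert hrest
    induction rest generalizing A with
    | nil => intro _; rfl
    | cons e tail ih =>
      intro hrest
      have he : e.isDigit = true := hrest e (by simp)
      conv_lhs => whnf
      generalize instDecidableEqBool e.isDigit true = J
      cases J with
      | isFalse hf => exact absurd he hf
      | isTrue ht =>
      conv_lhs => whnf
      rw [show decAcc A (e :: tail) = decAcc (A * 10 + (e.toNat - '0'.toNat)) tail from rfl]
      exact ih _ (fun c hc => hrest c (by simp [hc]))

theorem decAcc_toDigits2 (k : Nat) : ∀ a : Nat,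
    decAcc a (Nat.toDigits 2 k) = a * 10 ^ (Nat.toDigits 2 k).length + decv k := by
  induction k using Nat.strong_induction_on with
  | _ k ih =>
    intro a
    rw [td_step 2 k (by norm_num)]
    by_cases h : k < 2
    · rw [if_pos h]
      unfold decv
      rw [if_pos h]
      interval_cases k <;> simp [decAcc] <;> decide
    · rw [if_neg h]
      have hk2 : k / 2 < k := Nat.div_lt_self (by omega) (by omega)
      unfold decAcc
      rw [List.foldl_append]
      have hih := ih (k / 2) hk2 a
      unfold decAcc at hih
      rw [hih]
      conv_rhs => rw [decv]
      rw [if_neg h]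
      have hm : k % 2 = 0 ∨ k % 2 = 1 := by omega
      have hlen : (Nat.toDigits 2 (k / 2) ++ [Nat.digitChar (k % 2)]).length
          = (Nat.toDigits 2 (k / 2)).length + 1 := by simp
      rw [hlen]
      rcases hm with hm | hm <;>
        simp [hm, List.foldl, Nat.pow_succ, show (Nat.digitChar 0).toNat = 48 from by decide,
          show (Nat.digitChar 1).toNat = 49 from by decide] <;> ring

-- A's per-element value: int(bin(v).split("b")[1]) = decv |v|
theorem A_elem (v : Int) :
    (PySem.Int.ofStr? (String.ofList (Nat.toDigits 2 v.natAbs))).getD 0 = (decv v.natAbs : Int) := by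
  rw [PySem.Int.ofStr?_ofList]
  rw [ofChars?_digits _ (td_ne_nil 2 _ (by norm_num))
    (fun c hc => by rcases td2_chars _ c hc with h | h <;> (rw [h]; decide))]
  have h0 := decAcc_toDigits2 v.natAbs 0
  simp at h0
  simp [h0]

-- ---- bin(x).split("b")[1] ----
theorem go_no_sep : ∀ (fuel : Nat) (l cur : List Char) (acc : List (List Char)), 'b' ∉ l →
    PySem.Chars.splitOn.go ['b'] fuel l cur acc = ((cur.reverse ++ l) :: acc).reverse := by
  intro fuel
  induction fuel with
  | zero => intro l cur acc _; rfl
  | succ fuel ih =>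
    intro l cur acc h
    cases l with
    | nil => simp [PySem.Chars.splitOn.go]
    | cons c rest =>
      have hc : (['b'].isPrefixOf (c :: rest)) = false := by
        simp [List.isPrefixOf]
        intro he
        exact absurd (he ▸ List.mem_cons_self) h
      simp only [PySem.Chars.splitOn.go, hc, Bool.false_eq_true, if_false]
      rw [ih rest (c :: cur) acc (fun hm => h (List.mem_cons_of_mem c hm))]
      simp

theorem go_sep : ∀ (pre : List Char) (fuel : Nat) (ds cur : List Char) (acc : List (List Char)),
    'b' ∉ pre → pre.length < fuel →
    PySem.Chars.splitOn.go ['b'] fuel (pre ++ 'b' :: ds) cur acc =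
      PySem.Chars.splitOn.go ['b'] (fuel - (pre.length + 1)) ds [] ((cur.reverse ++ pre) :: acc) := by
  intro pre
  induction pre with
  | nil =>
    intro fuel ds cur acc _ hf
    cases fuel with
    | zero => omega
    | succ f =>
      have hc : (['b'].isPrefixOf ('b' :: ds)) = true := by simp [List.isPrefixOf]
      simp only [List.nil_append, PySem.Chars.splitOn.go, hc, if_true]
      simp
  | cons c pre' ih =>
    intro fuel ds cur acc hb hf
    cases fuel with
    | zero => omega
    | succ f =>
      have hcb : c ≠ 'b' := fun he => hb (he ▸ List.mem_cons_self)
      have hc : (['b'].isPrefixOf (c :: (pre' ++ 'b' :: ds))) = false := by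
        simp [List.isPrefixOf]
        exact fun he => absurd he.symm hcb
      simp only [List.cons_append, PySem.Chars.splitOn.go, hc, Bool.false_eq_true, if_false]
      rw [ih f ds (c :: cur) acc (fun hm => hb (List.mem_cons_of_mem c hm)) (by simpa using hf)]
      have : (c :: cur).reverse ++ pre' = cur.reverse ++ c :: pre' := by simp
      rw [this]
      congr 1
      simp [List.length_cons]

theorem splitOn_pre_b (pre ds : List Char) (h1 : 'b' ∉ pre) (h2 : 'b' ∉ ds) :
    PySem.Chars.splitOn (pre ++ 'b' :: ds) ['b'] = [pre, ds] := by
  unfold PySem.Chars.splitOn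
  rw [go_sep pre _ ds [] [] h1 (by simp)]
  rw [go_no_sep _ ds [] _ h2]
  simp

theorem SPL (x : Int) :
    PySem.List.pyGetD ((PySem.Str.split? (PySem.Int.pyBin x) "b").getD []) 1 ""
      = String.ofList (Nat.toDigits 2 x.natAbs) := by
  have hds : 'b' ∉ Nat.toDigits 2 x.natAbs := by
    intro hm
    rcases td2_chars _ _ hm with h | h <;> exact absurd h (by decide)
  have htl : ("b" : String).toList = ['b'] := by decide
  unfold PySem.Str.split?
  rw [PySem.Int.toList_pyBin, htl]
  by_cases hx : x < 0
  · have hb : PySem.Int.toBinChars0b x = ['-', '0'] ++ 'b' :: Nat.toDigits 2 x.natAbs := by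
      simp [PySem.Int.toBinChars0b, hx]
    rw [hb]
    rw [show PySem.Chars.split? (['-', '0'] ++ 'b' :: Nat.toDigits 2 x.natAbs) ['b']
        = some (PySem.Chars.splitOn (['-', '0'] ++ 'b' :: Nat.toDigits 2 x.natAbs) ['b']) from by
      simp [PySem.Chars.split?]]
    rw [splitOn_pre_b _ _ (by decide) hds]
    rfl
  · have hnn : x.toNat = x.natAbs := by omega
    have hb : PySem.Int.toBinChars0b x = ['0'] ++ 'b' :: Nat.toDigits 2 x.natAbs := by
      simp [PySem.Int.toBinChars0b, hx, hnn]
    rw [hb]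
    rw [show PySem.Chars.split? (['0'] ++ 'b' :: Nat.toDigits 2 x.natAbs) ['b']
        = some (PySem.Chars.splitOn (['0'] ++ 'b' :: Nat.toDigits 2 x.natAbs) ['b']) from by
      simp [PySem.Chars.split?]]
    rw [splitOn_pre_b _ _ (by decide) hds]
    rfl

-- ---- bit counting ----
theorem cnt_succ (x i : Nat) : cntN (x + 1) i = cntN x i + bitv i x := by
  unfold cntN bitv
  have hp : 0 < 2 ^ i := Nat.two_pow_pos i
  simp only [Nat.shiftRight_eq_div_pow]
  set p := 2 ^ i with hpd
  set P := 2 ^ (i + 1) with hPd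
  have hPp : P = 2 * p := by rw [hPd, hpd, pow_succ]; ring
  have hPpos : 0 < P := by omega
  have hx : P * (x / P) + x % P = x := Nat.div_add_mod x P
  have hrP : x % P < P := Nat.mod_lt _ hPpos
  set q := x / P with hqd
  set r := x % P with hrd
  have hxs : x = r + 2 * q * p := by
    rw [← hx, hPp]; ring
  have hxp : x / p = r / p + 2 * q := by
    conv_lhs => rw [hxs]
    rw [show r + 2 * q * p = r + p * (2 * q) from by ring, Nat.add_mul_div_left _ _ hp]
  have hrp2 : r / p < 2 := by
    rw [Nat.div_lt_iff_lt_mul hp]; omega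
  have hbit : x / p % 2 = r / p := by rw [hxp, Nat.add_mul_mod_self_left, Nat.mod_eq_of_lt hrp2]
  by_cases hcase : r + 1 < P
  · have hx1 : x + 1 = (r + 1) + P * q := by rw [hxs, hPp]; ring
    have hdiv : (x + 1) / P = q := by
      rw [hx1, Nat.add_mul_div_left _ _ hPpos, Nat.div_eq_of_lt hcase, zero_add]
    have hmod : (x + 1) % P = r + 1 := by
      rw [hx1, Nat.add_mul_mod_self_left, Nat.mod_eq_of_lt hcase]
    rw [hdiv, hmod, hbit]
    have hrp_cases : (p ≤ r ∧ r / p = 1) ∨ (r < p ∧ r / p = 0) := by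
      by_cases hle : p ≤ r
      · left
        refine ⟨hle, ?_⟩
        have := (Nat.one_le_div_iff hp).mpr hle
        omega
      · right; exact ⟨by omega, Nat.div_eq_of_lt (by omega)⟩
    generalize q * p = Q
    rcases hrp_cases with ⟨h1, h2⟩ | ⟨h1, h2⟩ <;> rw [h2] <;> omega
  · have hr1 : r + 1 = P := by omega
    have hx1 : x + 1 = (q + 1) * P := by rw [hxs, hPp]; rw [show (q+1)*(2*p) = 2*q*p + (2*p) from by ring]; omega
    have hdiv : (x + 1) / P = q + 1 := by rw [hx1]; exact Nat.mul_div_cancel _ hPpos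
    have hmod : (x + 1) % P = 0 := by rw [hx1]; exact Nat.mul_mod_left _ _
    rw [hdiv, hmod, hbit]
    have h2 : r / p = 1 := by
      have h3 : p ≤ r := by omega
      have := (Nat.one_le_div_iff hp).mpr h3
      omega
    rw [h2, add_mul]
    generalize q * p = Q
    omega

theorem decv_zero : decv 0 = 0 := by rw [decv]; norm_num

theorem decv_one : decv 1 = 1 := by rw [decv]; norm_num

theorem decv_rec (k : Nat) : decv k = 10 * decv (k / 2) + k % 2 := by
  by_cases h : k < 2
  · interval_cases k <;> simp [decv_zero, decv_one]
  · conv_lhs => rw [decv]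
    rw [if_neg h]

theorem bitv_succ (i k : Nat) : bitv (i + 1) k = bitv i (k / 2) := by
  unfold bitv
  simp only [Nat.shiftRight_eq_div_pow]
  rw [Nat.div_div_eq_div_mul, pow_succ']

theorem decv_eq_sum (L : Nat) : ∀ k : Nat, k < 2 ^ L →
    decv k = ∑ i ∈ Finset.range L, 10 ^ i * bitv i k := by
  induction L with
  | zero =>
    intro k h
    have : k = 0 := by omega
    subst this
    simp [decv_zero]
  | succ L ih =>
    intro k h
    rw [decv_rec k, Finset.sum_range_succ']
    have hk2 : k / 2 < 2 ^ L := by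
      have h2 : (2:Nat) ^ (L + 1) = 2 * 2 ^ L := by rw [pow_succ]; ring
      omega
    have hrw : ∀ i, 10 ^ (i + 1) * bitv (i + 1) k = 10 * (10 ^ i * bitv i (k / 2)) := by
      intro i
      rw [bitv_succ, pow_succ]
      ring
    rw [Finset.sum_congr rfl (fun i _ => hrw i), ← Finset.mul_sum, ← ih (k / 2) hk2]
    have hb0 : 10 ^ 0 * bitv 0 k = k % 2 := by
      unfold bitv
      simp
    rw [hb0]

-- sum of bit i over an Int range of nonnegative values
theorem sum_bit_range (i : Nat) (a : Int) (ha : 0 ≤ a) : ∀ b : Int, a ≤ b →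
    cntN a.toNat i + (((PySem.List.pyRange a b 1).map (fun v => bitv i v.toNat)).sum)
      = cntN b.toNat i := by
  intro b hab
  induction b, hab using Int.le_induction with
  | base => simp [PySem.List.pyRange_one_eq_nil (le_refl a)]
  | succ b hb ih =>
    rw [PySem.List.pyRange_one_succ_right hb, List.map_append, List.sum_append]
    have htn : (b + 1).toNat = b.toNat + 1 := by omega
    rw [htn, cnt_succ]
    simp only [List.map_cons, List.map_nil, List.sum_cons, List.sum_nil]
    omega

-- count_below computes cntN on nonnegative arguments
theorem count_below_eq (x : Int) (hx : 0 ≤ x) (i : Nat) :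
    count_below x i = (cntN x.toNat i : Int) := by
  obtain ⟨k, rfl⟩ : ∃ k : Nat, x = (k : Int) := ⟨x.toNat, by omega⟩
  simp only [count_below, cntN]
  rw [Nat.one_shiftLeft]
  rw [show (((2 ^ (i + 1) : Nat) : Int) >>> (1 : Nat)) = ((2 ^ i : Nat) : Int) from by
    rw [show (((2 ^ (i + 1) : Nat) : Int) >>> (1 : Nat)) = ((2 ^ (i + 1) >>> 1 : Nat) : Int) from rfl]
    congr 1
    rw [Nat.shiftRight_eq_div_pow, pow_succ, pow_one, Nat.mul_div_cancel _ (by norm_num)]]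
  rw [PySem.Int.floordiv_natCast, PySem.Int.mod_natCast, Int.toNat_natCast]
  rcases Nat.lt_or_ge (k % 2 ^ (i + 1)) (2 ^ i) with h | h
  · rw [max_eq_left (by omega), Nat.sub_eq_zero_of_le (Nat.le_of_lt h)]
    push_cast
    ring
  · rw [max_eq_right (by omega)]
    push_cast [Nat.cast_sub h]
    ring

theorem cast_sum_list (l : List Int) (f : Int → Nat) :
    (l.map (fun v => (f v : Int))).sum = ((l.map f).sum : Int) := by
  induction l with
  | nil => simp
  | cons x l ih => simp [ih]

theorem sum_swap_list (L : Nat) (h : Nat → Int → Int) : ∀ l : List Int,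
    (l.map (fun v => ∑ i ∈ Finset.range L, h i v)).sum
      = ∑ i ∈ Finset.range L, (l.map (h i)).sum := by
  intro l
  induction l with
  | nil => simp
  | cons x l ih => simp [ih, Finset.sum_add_distrib]

-- append-accumulating foldl is map
theorem foldl_append_map {α β : Type} (f : α → β) : ∀ (l : List α) (init : List β),
    l.foldl (fun acc v => acc ++ [f v]) init = init ++ l.map f := by
  intro l
  induction l with
  | nil => intro init; simp
  | cons x l ih => intro init; simp [ih]

-- B's accumulating loop over range(L) is a Finset sum
theorem foldl_range_sum (g : Nat → Int) : ∀ L : Nat,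
    (PySem.List.pyRange 0 ((L : Nat) : Int) 1).foldl (fun t i => t + g i.toNat) 0
      = ∑ i ∈ Finset.range L, g i := by
  intro L
  induction L with
  | zero => simp [PySem.List.pyRange_one_eq_nil (le_refl (0 : Int))]
  | succ L ih =>
    rw [show (((L + 1 : Nat) : Int)) = ((L : Nat) : Int) + 1 from by push_cast; ring]
    rw [PySem.List.pyRange_one_succ_right (by positivity), List.foldl_append]
    simp only [List.foldl_cons, List.foldl_nil]
    rw [ih, Int.toNat_natCast, Finset.sum_range_succ]

-- A's result as binary digits of a Nat sum
theorem A_eq_digits (m n : Int) :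
    binary_pyramid m n = String.ofList (Nat.toDigits 2
      (((PySem.List.pyRange m (n + 1) 1).map (fun v => decv v.natAbs)).sum)) := by
  unfold binary_pyramid
  rw [foldl_append_map (fun v =>
    (PySem.Int.ofStr? (PySem.List.pyGetD ((PySem.Str.split? (PySem.Int.pyBin v) "b").getD []) 1 "")).getD 0)]
  rw [List.nil_append]
  rw [List.map_congr_left (fun v _ => by rw [SPL v, A_elem v] :
    ∀ v ∈ PySem.List.pyRange m (n + 1) 1,
      (PySem.Int.ofStr? (PySem.List.pyGetD ((PySem.Str.split? (PySem.Int.pyBin v) "b").getD []) 1 "")).getD 0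
        = (fun v => ((decv v.natAbs : Nat) : Int)) v)]
  show PySem.List.pyGetD ((PySem.Str.split? (PySem.Int.pyBin
      (((PySem.List.pyRange m (n + 1) 1).map (fun v => ((decv v.natAbs : Nat) : Int))).sum)) "b").getD []) 1 "" = _
  rw [cast_sum_list _ (fun v => decv v.natAbs), SPL, Int.natAbs_natCast]

-- the per-bit identity: B's total equals A's sum, for a nonnegative range
theorem total_eq (m n : Int) (hm : 0 ≤ m) (hmn : m ≤ n) :
    (∑ i ∈ Finset.range (PySem.Int.bitLength (n + 1)),
        (count_below (n + 1) i - count_below m i) * 10 ^ i)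
      = (((PySem.List.pyRange m (n + 1) 1).map (fun v => decv v.natAbs)).sum : Int) := by
  set L := PySem.Int.bitLength (n + 1) with hL
  set S := PySem.List.pyRange m (n + 1) 1 with hS
  have hv2 : ∀ v ∈ S, v.natAbs < 2 ^ L := by
    intro v hv
    rw [hS, PySem.List.mem_pyRange_one] at hv
    have h1 := PySem.Int.lt_two_pow_bitLength (n + 1)
    rw [← hL] at h1
    omega
  rw [← cast_sum_list S (fun v => decv v.natAbs)]
  rw [List.map_congr_left (fun v hv => by
    rw [decv_eq_sum L v.natAbs (hv2 v hv), Nat.cast_sum] :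
    ∀ v ∈ S, ((decv v.natAbs : Nat) : Int)
      = (fun v => ∑ i ∈ Finset.range L, (fun i (v : Int) => ((10 ^ i * bitv i v.natAbs : Nat) : Int)) i v) v)]
  rw [sum_swap_list L (fun i v => ((10 ^ i * bitv i v.natAbs : Nat) : Int)) S]
  apply Finset.sum_congr rfl
  intro i _
  have hmem : ∀ v ∈ S, ((10 ^ i * bitv i v.natAbs : Nat) : Int)
      = (fun v : Int => ((bitv i v.toNat : Nat) : Int) * 10 ^ i) v := by
    intro v hv
    rw [hS, PySem.List.mem_pyRange_one] at hv
    have : v.natAbs = v.toNat := by omega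
    rw [this]
    push_cast
    ring
  rw [List.map_congr_left hmem, List.sum_map_mul_right, cast_sum_list]
  have hsb := sum_bit_range i m hm (n + 1) (by omega)
  rw [← hS] at hsb
  rw [count_below_eq (n + 1) (by omega) i, count_below_eq m hm i]
  have hcast : (cntN m.toNat i : Int) + ((S.map (fun v => bitv i v.toNat)).sum : Int)
      = (cntN (n + 1).toNat i : Int) := by exact_mod_cast hsb
  rw [← hcast]
  ring

theorem toBin_natCast (N : Nat) : PySem.Int.toBin ((N : Nat) : Int) = String.ofList (Nat.toDigits 2 N) := by
  unfold PySem.Int.toBin PySem.Int.toBinChars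
  rw [if_neg (by omega), Int.toNat_natCast]

theorem main_eq (m n : Int) (hpre : ¬ (m < 0 ∧ m ≤ n)) :
    binary_pyramid m n = binary_pyramid_alt m n := by
  by_cases hnm : n < m
  · unfold binary_pyramid binary_pyramid_alt
    rw [if_pos hnm]
    rw [PySem.List.pyRange_one_eq_nil (by omega : n + 1 ≤ m)]
    simp only [List.foldl_nil, List.sum_nil]
    rw [SPL 0]
    decide
  · have hm : 0 ≤ m := by omega
    have hmn : m ≤ n := by omega
    rw [A_eq_digits]
    unfold binary_pyramid_alt
    rw [if_neg hnm]
    rw [foldl_range_sum (fun j => (count_below (n + 1) j - count_below m j) * 10 ^ j)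
      (PySem.Int.bitLength (n + 1))]
    rw [total_eq m n hm hmn, toBin_natCast]

-- ===== VERDICT (by name: the statement is the Claim_ definition above) =====
theorem binary_pyramid_spec : Claim_equal_binary_pyramid := by
  intro m n _ hpre
  unfold Spec_binary_pyramid
  exact main_eq m n hpre
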